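-- pv_equiv track=rewrite | github.com/casper-hansen/Nested-Cross-Validation | nested_cv/nested_cv.py | _score_to_best_params
-- ===== SOURCE A (Python) =====
-- def _score_to_best_params(best_inner_params_list):
--     params_dict = {}
--     for best_inner_params in best_inner_params_list:
--         for key, value in best_inner_params.items():
--             if key in params_dict:
--                 if value not in params_dict[key]:
--                     params_dict[key].append(value)
--             else:
--                 params_dict[key] = [value]
--     return params_dict
-- ===== SOURCE B (Python) =====
-- def _score_to_best_params(best_inner_params_list):
--     # Pass 1: group every value under its key, no dedup yet.
--     grouped = {}
--     for best_inner_params in best_inner_params_list: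
--         for key, value in best_inner_params.items():
--             grouped.setdefault(key, []).append(value)
--     # Pass 2: dedup each key's values, preserving first-seen order.
--     result = {}
--     for key, values in grouped.items():
--         uniq = []
--         for value in values:
--             if value not in uniq:
--                 uniq.append(value)
--         result[key] = uniq
--     return result
-- ===== Notes on version B (the rewrite author's own statement) =====
-- stated objective: alternative
-- what changed: Replaces A's single pass with interleaved per-element dedup bookkeeping by a two-phase decomposition: first group all values per key with setdefault/append, then a separate dedup pass over the grouped dict; result dict is built fresh in the second phase.
import Mathlib
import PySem

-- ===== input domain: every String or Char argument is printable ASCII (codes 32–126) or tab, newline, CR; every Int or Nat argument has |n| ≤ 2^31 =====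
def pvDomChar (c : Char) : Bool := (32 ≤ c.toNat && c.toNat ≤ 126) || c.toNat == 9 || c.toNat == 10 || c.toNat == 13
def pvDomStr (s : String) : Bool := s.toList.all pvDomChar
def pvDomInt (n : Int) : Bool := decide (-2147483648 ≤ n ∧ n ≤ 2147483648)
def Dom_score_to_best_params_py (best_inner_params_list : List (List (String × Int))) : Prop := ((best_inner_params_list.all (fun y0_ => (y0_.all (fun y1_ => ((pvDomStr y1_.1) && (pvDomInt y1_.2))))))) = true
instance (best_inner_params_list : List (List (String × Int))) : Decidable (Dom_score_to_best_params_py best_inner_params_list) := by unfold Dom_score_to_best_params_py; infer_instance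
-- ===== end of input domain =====

-- B changes the decomposition only (group first, dedup second); same result, same cost ("alternative").

-- ===== PORT A =====
-- one pass: per pair, insert the key with [value] or append value if unseen
def score_to_best_params_py (best_inner_params_list : List (List (String × Int))) : List (String × List Int) :=
  (best_inner_params_list.foldl
    (fun params_dict best_inner_params =>
      (PySem.Dict.ofList best_inner_params).items.foldl
        (fun params_dict p =>
          if params_dict.contains p.1 then
            if (params_dict.getD p.1 []).contains p.2 then params_dict
            else params_dict.modify p.1 [] (· ++ [p.2])
          else params_dict.insert p.1 [p.2])
        params_dict)
    PySem.Dict.empty).items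

-- ===== PORT B =====
-- pass 1: group all values per key (no dedup); pass 2: dedup each key's list into a fresh dict
def score_to_best_params_py_alt (best_inner_params_list : List (List (String × Int))) : List (String × List Int) :=
  let grouped := best_inner_params_list.foldl
    (fun grouped best_inner_params =>
      (PySem.Dict.ofList best_inner_params).items.foldl
        (fun grouped p => grouped.modify p.1 [] (· ++ [p.2]))
        grouped)
    PySem.Dict.empty
  let result := grouped.items.foldl
    (fun result q =>
      result.insert q.1 (q.2.foldl (fun uniq v => if uniq.contains v then uniq else uniq ++ [v]) []))
    PySem.Dict.empty
  result.items

-- ===== PRECONDITION & SPEC =====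
def Spec_score_to_best_params_py (best_inner_params_list : List (List (String × Int))) (out : List (String × List Int)) : Prop := out = score_to_best_params_py_alt best_inner_params_list
instance (best_inner_params_list : List (List (String × Int))) (out : List (String × List Int)) : Decidable (Spec_score_to_best_params_py best_inner_params_list out) := by unfold Spec_score_to_best_params_py; infer_instance

-- ===== CLAIM (what is proved, stated in full; the proofs are below) =====
def Claim_equal_score_to_best_params_py : Prop := ∀ (best_inner_params_list : List (List (String × Int))), Dom_score_to_best_params_py best_inner_params_list → Spec_score_to_best_params_py best_inner_params_list (score_to_best_params_py best_inner_params_list)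

-- ===== LEMMAS AND PROOFS =====

-- nested loop over a list of lists = one loop over the flattened pair stream
theorem pv_foldl_flat {α β γ : Type} (l : List α) (g : α → List β) (f : γ → β → γ) (init : γ) :
    l.foldl (fun acc x => (g x).foldl f acc) init = (l.flatMap g).foldl f init := by
  induction l generalizing init with
  | nil => rfl
  | cons a t ih => simp [List.flatMap_cons, List.foldl_append, ih]

-- inserting a key's current value back is a no-op (keys unique)
theorem pv_insert_getD_self (d : PySem.Dict String (List Int)) (k : String)
    (hc : d.contains k = true) (hnd : d.keys.Nodup) :
    d.insert k (d.getD k []) = d := by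
  apply PySem.Dict.ext
  rw [PySem.Dict.items_insert_of_contains d _ hc]
  conv_rhs => rw [← List.map_id d.items]
  apply List.map_congr_left
  intro p hp
  by_cases h : p.1 = k
  · subst h
    have hm : (p.1, p.2) ∈ d.items := hp
    have hg := PySem.Dict.getD_of_mem_items d hm hnd []
    simp [hg]
  · simp [h]

-- A's step equals an unconditional modify with the dedup-append function
theorem pv_stepA_eq (d : PySem.Dict String (List Int)) (p : String × Int) (hnd : d.keys.Nodup) :
    (if d.contains p.1 then
       if (d.getD p.1 []).contains p.2 then d
       else d.modify p.1 [] (· ++ [p.2])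
     else d.insert p.1 [p.2])
    = d.modify p.1 [] (fun l => if l.contains p.2 then l else l ++ [p.2]) := by
  by_cases hc : d.contains p.1
  · by_cases hv : (d.getD p.1 []).contains p.2
    · have hmod : d.modify p.1 [] (fun l => if l.contains p.2 then l else l ++ [p.2])
          = d.insert p.1 (d.getD p.1 []) := by
        show d.insert p.1 (if (d.getD p.1 []).contains p.2 then d.getD p.1 [] else _) = _
        rw [hv]; simp
      rw [if_pos hc, if_pos hv, hmod, pv_insert_getD_self d p.1 hc hnd]
    · have hv' : p.2 ∉ d.getD p.1 [] := by simpa using hv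
      simp [hc, hv', PySem.Dict.modify]
  · have hcf : d.contains p.1 = false := by simpa using hc
    have h0 : d.getD p.1 [] = [] := PySem.Dict.getD_of_not_contains d [] hcf
    show _ = d.insert p.1 (if (d.getD p.1 []).contains p.2 then _ else _)
    rw [h0]
    simp [hcf]

-- A's fold = the unconditional-modify fold (keys stay unique)
theorem pv_foldA_eq (pairs : List (String × Int)) (d : PySem.Dict String (List Int)) (hnd : d.keys.Nodup) :
    pairs.foldl
      (fun params_dict p =>
        if params_dict.contains p.1 then
          if (params_dict.getD p.1 []).contains p.2 then params_dict
          else params_dict.modify p.1 [] (· ++ [p.2])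
        else params_dict.insert p.1 [p.2]) d
    = pairs.foldl (fun d p => d.modify p.1 [] (fun l => if l.contains p.2 then l else l ++ [p.2])) d := by
  induction pairs generalizing d with
  | nil => rfl
  | cons p t ih =>
    simp only [List.foldl_cons]
    rw [pv_stepA_eq d p hnd]
    exact ih _ (PySem.Dict.nodup_keys_foldl_modify_key [p] (·.1) [] (fun _ q => fun l => if l.contains q.2 then l else l ++ [q.2]) d hnd)

-- getD of a fold of modifies at key c = fold of the value function over c's values
theorem pv_getD_foldl_modify (G : List Int → Int → List Int) (pairs : List (String × Int))
    (d : PySem.Dict String (List Int)) (c : String) :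
    (pairs.foldl (fun d p => d.modify p.1 [] (fun l => G l p.2)) d).getD c []
    = ((pairs.filter (fun p => p.1 == c)).map (·.2)).foldl G (d.getD c []) := by
  induction pairs generalizing d with
  | nil => rfl
  | cons p t ih =>
    simp only [List.foldl_cons, List.filter_cons]
    by_cases h : p.1 = c
    · simp only [h, beq_self_eq_true, ih]
      rw [PySem.Dict.getD_modify]
      simp
    · have : (p.1 == c) = false := by simp [h]
      simp only [this, Bool.false_eq_true, if_false, ih]
      rw [PySem.Dict.getD_modify]
      simp [Ne.symm h]

theorem pv_foldl_append_eq (vs : List Int) (acc : List Int) :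
    vs.foldl (fun l v => l ++ [v]) acc = acc ++ vs := by
  induction vs generalizing acc with
  | nil => simp
  | cons v t ih => simp [ih]

-- ===== VERDICT (by name: the statement is the Claim_ definition above) =====
theorem score_to_best_params_py_spec : Claim_equal_score_to_best_params_py := by
  intro l _
  show score_to_best_params_py l = score_to_best_params_py_alt l
  unfold score_to_best_params_py score_to_best_params_py_alt
  rw [pv_foldl_flat, pv_foldl_flat]
  set pairs := l.flatMap (fun inner => (PySem.Dict.ofList inner).items) with hp
  set dedupStep : List Int → Int → List Int := fun uniq v => if uniq.contains v then uniq else uniq ++ [v] with hds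
  have hndE : (PySem.Dict.empty : PySem.Dict String (List Int)).keys.Nodup := PySem.Dict.nodup_keys_empty
  rw [pv_foldA_eq pairs PySem.Dict.empty hndE]
  set dA := pairs.foldl (fun d p => d.modify p.1 [] (fun l => if l.contains p.2 then l else l ++ [p.2])) PySem.Dict.empty with hdA
  set dG := pairs.foldl (fun d p => d.modify p.1 [] (· ++ [p.2])) PySem.Dict.empty with hdG
  have hndA : dA.keys.Nodup := PySem.Dict.nodup_keys_foldl_modify_key pairs (·.1) []
    (fun _ q => fun l => if l.contains q.2 then l else l ++ [q.2]) PySem.Dict.empty hndE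
  have hndG : dG.keys.Nodup := PySem.Dict.nodup_keys_foldl_modify_key pairs (·.1) []
    (fun _ q => (· ++ [q.2])) PySem.Dict.empty hndE
  -- B's second pass appends fresh distinct keys
  have hB : (dG.items.foldl
      (fun result q => result.insert q.1 (q.2.foldl dedupStep []))
      (PySem.Dict.empty : PySem.Dict String (List Int))).items
      = dG.items.map (fun q => (q.1, q.2.foldl dedupStep [])) := by
    have := PySem.Dict.items_foldl_insert_fresh dG.items (·.1) (fun q => q.2.foldl dedupStep [])
      (PySem.Dict.empty : PySem.Dict String (List Int))
      (fun a _ => PySem.Dict.contains_empty a.1) hndG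
    simpa using this
  rw [hB]
  -- both sides as maps over the (same) key list
  have hkeys : dA.keys = dG.keys := by
    rw [hdA, hdG,
      PySem.Dict.keys_foldl_modify_key pairs (·.1) [] (fun _ q => fun l => if l.contains q.2 then l else l ++ [q.2]),
      PySem.Dict.keys_foldl_modify_key pairs (·.1) [] (fun _ q => (· ++ [q.2]))]
  rw [PySem.Dict.items_eq_map_keys dA hndA [], PySem.Dict.items_eq_map_keys dG hndG [],
    List.map_map, hkeys]
  apply List.map_congr_left
  intro k _
  have hA : dA.getD k [] = ((pairs.filter (fun p => p.1 == k)).map (·.2)).foldl dedupStep [] := by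
    rw [hdA, pv_getD_foldl_modify dedupStep pairs PySem.Dict.empty k]
    simp
  have hG : dG.getD k [] = (pairs.filter (fun p => p.1 == k)).map (·.2) := by
    rw [hdG, pv_getD_foldl_modify (fun l v => l ++ [v]) pairs PySem.Dict.empty k]
    rw [pv_foldl_append_eq]
    simp
  simp [Function.comp, hA, hG]
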